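-- pv_equiv track=rewrite | github.com/primrose101/CS322 | finite_state_machines/keywords.py | kwas_fsm
-- ===== SOURCE A (Python) =====
-- def kwas_fsm(string_input, index):
--     i = index
--
--     table = [
--         [1, 3, 3],
--         [3, 2, 3],
--         [3, 3, 3],
--         [3, 3, 3],
--     ]
--
--     state = 0
--     inputstate = 0
--
--     string_length = len(string_input)
--
--     while i != string_length:
--         if string_input[i] == 'A':
--             inputstate = 0
--         elif string_input[i] == 'S':
--             inputstate = 1
--         else:
--             inputstate = 2
--
--         state = table[state][inputstate]
--
--         if state == 3:
--             break
--
--         i += 1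
--
--     return i - index
-- ===== SOURCE B (Python) =====
-- def kwas_fsm(string_input, index):
--     count = 0
--     if index != len(string_input) and string_input[index] == 'A':
--         count = 1
--         if index + 1 != len(string_input) and string_input[index + 1] == 'S':
--             count = 2
--     return count
-- ===== Notes on version B (the rewrite author's own statement) =====
-- stated objective: simpler
-- what changed: Replaces the table-driven DFA while-loop (transition table, state and inputstate variables) with two direct conditional character checks that compute the capped 'AS'-prefix length immediately.
import Mathlib
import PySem

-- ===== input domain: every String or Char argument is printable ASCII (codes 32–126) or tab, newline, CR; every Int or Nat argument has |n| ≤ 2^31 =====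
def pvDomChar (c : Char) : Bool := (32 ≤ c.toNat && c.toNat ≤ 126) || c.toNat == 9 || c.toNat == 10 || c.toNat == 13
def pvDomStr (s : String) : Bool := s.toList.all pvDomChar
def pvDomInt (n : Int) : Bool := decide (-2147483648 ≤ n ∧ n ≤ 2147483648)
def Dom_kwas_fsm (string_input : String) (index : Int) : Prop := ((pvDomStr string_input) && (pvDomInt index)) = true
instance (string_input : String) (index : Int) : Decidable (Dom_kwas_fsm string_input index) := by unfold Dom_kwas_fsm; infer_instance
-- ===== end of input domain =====

-- B replaces A's table-driven DFA while-loop with two direct conditional character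
-- checks computing the capped 'AS'-prefix length (simpler; same O(1) cost).


-- ===== PORT A =====
-- A's transition table, exactly as in the Python source.
def kwasTable : List (List Int) := [[1, 3, 3], [3, 2, 3], [3, 3, 3], [3, 3, 3]]

-- A's while-loop: state, inputstate and the table lookup exactly as in the source.
-- The out-of-range default ' ' stands where Python raises IndexError (excluded by Pre_).
-- Fuel 4 is exact: the state sequence 0→1→2→3 breaks the loop within 3 iterations on every input.
def kwasLoopA (s : String) (n : Int) (fuel : Nat) (state i : Int) : Int :=
  match fuel with
  | 0 => i
  | Nat.succ fuel =>
    if i = n then i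
    else
      let c := (PySem.Str.pyGet? s i).getD ' '
      let inputstate : Int := if c = 'A' then 0 else if c = 'S' then 1 else 2
      let state' := PySem.List.pyGetD (PySem.List.pyGetD kwasTable state []) inputstate 3
      if state' = 3 then i
      else kwasLoopA s n fuel state' (i + 1)

def kwas_fsm (string_input : String) (index : Int) : Int :=
  let string_length := PySem.Str.len string_input
  kwasLoopA string_input string_length 4 0 index - index

-- ===== PORT B =====
def kwas_fsm_alt (string_input : String) (index : Int) : Int :=
  let n := PySem.Str.len string_input
  if index ≠ n ∧ PySem.Str.pyGet? string_input index = some 'A' then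
    if index + 1 ≠ n ∧ PySem.Str.pyGet? string_input (index + 1) = some 'S' then 2 else 1
  else 0

-- ===== PRECONDITION & SPEC =====
-- A raises IndexError exactly when index > len or index < -len (negative indices wrap);
-- Pre_ excludes exactly those inputs.
def Pre_kwas_fsm (string_input : String) (index : Int) : Prop :=
  -(PySem.Str.len string_input) ≤ index ∧ index ≤ PySem.Str.len string_input
instance (string_input : String) (index : Int) : Decidable (Pre_kwas_fsm string_input index) := by
  unfold Pre_kwas_fsm; infer_instance

def pvWitness_kwas_fsm : String × Int := ("xAS", 1)

def Spec_kwas_fsm (string_input : String) (index : Int) (out : Int) : Prop := out = kwas_fsm_alt string_input index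
instance (string_input : String) (index : Int) (out : Int) : Decidable (Spec_kwas_fsm string_input index out) := by unfold Spec_kwas_fsm; infer_instance

-- ===== CLAIM (what is proved, stated in full; the proofs are below) =====
def Claim_equal_kwas_fsm : Prop := ∀ (string_input : String) (index : Int), Dom_kwas_fsm string_input index → Pre_kwas_fsm string_input index → Spec_kwas_fsm string_input index (kwas_fsm string_input index)

-- ===== LEMMAS AND PROOFS =====

-- In-range accesses succeed (A's loop never hits the ' ' default inside Pre_).
theorem kwas_get_ex (s : String) (i : Int)
    (h1 : -(PySem.Str.len s) ≤ i) (h2 : i < PySem.Str.len s) :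
    ∃ c, PySem.Str.pyGet? s i = some c := by
  cases hc : PySem.Str.pyGet? s i with
  | some c => exact ⟨c, rfl⟩
  | none =>
    exfalso
    have hn := (PySem.List.pyGet?_eq_none_iff s.toList i).mp (by simpa using hc)
    unfold PySem.Raise.InRange at hn
    simp [PySem.Str.len_eq] at h1 h2 hn
    omega

-- One iteration of A's loop, with the let-bindings spelled out.
theorem loopA_step (s : String) (n : Int) (fuel : Nat) (state i : Int) (c : Char)
    (hin : i ≠ n) (hc : PySem.Str.pyGet? s i = some c) :
    kwasLoopA s n (fuel + 1) state i =
      if PySem.List.pyGetD (PySem.List.pyGetD kwasTable state [])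
           (if c = 'A' then 0 else if c = 'S' then 1 else 2) 3 = 3
      then i
      else kwasLoopA s n fuel
             (PySem.List.pyGetD (PySem.List.pyGetD kwasTable state [])
               (if c = 'A' then 0 else if c = 'S' then 1 else 2) 3) (i + 1) := by
  simp only [kwasLoopA, if_neg hin, hc, Option.getD_some]

theorem loopA_stop (s : String) (n : Int) (fuel : Nat) (state i : Int) (h : i = n) :
    kwasLoopA s n (fuel + 1) state i = i := by
  simp only [kwasLoopA, if_pos h]

-- state 0 on 'A' advances to state 1.
theorem loopA_stepA (s : String) (n : Int) (fuel : Nat) (i : Int)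
    (hin : i ≠ n) (hc : PySem.Str.pyGet? s i = some 'A') :
    kwasLoopA s n (fuel + 1) 0 i = kwasLoopA s n fuel 1 (i + 1) := by
  rw [loopA_step s n fuel 0 i 'A' hin hc]
  simp [kwasTable, PySem.List.pyGetD, PySem.List.pyGet?, PySem.List.pyIdx?]

-- state 0 on anything but 'A' reaches 3 and breaks.
theorem loopA_stepNotA (s : String) (n : Int) (fuel : Nat) (i : Int) (c : Char)
    (hin : i ≠ n) (hc : PySem.Str.pyGet? s i = some c) (hne : c ≠ 'A') :
    kwasLoopA s n (fuel + 1) 0 i = i := by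
  rw [loopA_step s n fuel 0 i c hin hc]
  by_cases hS : c = 'S' <;>
    simp [hne, hS, kwasTable, PySem.List.pyGetD, PySem.List.pyGet?, PySem.List.pyIdx?]

-- state 1 on 'S' advances to state 2.
theorem loopA_stepS (s : String) (n : Int) (fuel : Nat) (i : Int)
    (hin : i ≠ n) (hc : PySem.Str.pyGet? s i = some 'S') :
    kwasLoopA s n (fuel + 1) 1 i = kwasLoopA s n fuel 2 (i + 1) := by
  rw [loopA_step s n fuel 1 i 'S' hin hc]
  simp [kwasTable, PySem.List.pyGetD, PySem.List.pyGet?, PySem.List.pyIdx?]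

-- state 1 on anything but 'S' reaches 3 and breaks.
theorem loopA_stepNotS (s : String) (n : Int) (fuel : Nat) (i : Int) (c : Char)
    (hin : i ≠ n) (hc : PySem.Str.pyGet? s i = some c) (hne : c ≠ 'S') :
    kwasLoopA s n (fuel + 1) 1 i = i := by
  rw [loopA_step s n fuel 1 i c hin hc]
  by_cases hA : c = 'A' <;>
    simp [hne, hA, kwasTable, PySem.List.pyGetD, PySem.List.pyGet?, PySem.List.pyIdx?]

-- state 2 breaks on every character.
theorem loopA_step2 (s : String) (n : Int) (fuel : Nat) (i : Int) (c : Char)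
    (hin : i ≠ n) (hc : PySem.Str.pyGet? s i = some c) :
    kwasLoopA s n (fuel + 1) 2 i = i := by
  rw [loopA_step s n fuel 2 i c hin hc]
  by_cases hA : c = 'A' <;> by_cases hS : c = 'S' <;>
    simp [hA, hS, kwasTable, PySem.List.pyGetD, PySem.List.pyGet?, PySem.List.pyIdx?]

-- ===== VERDICT (by name: the statement is the Claim_ definition above) =====
theorem kwas_fsm_spec : Claim_equal_kwas_fsm := by
  intro s index _ hpre
  obtain ⟨h1, h2⟩ := hpre
  unfold Spec_kwas_fsm kwas_fsm kwas_fsm_alt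
  dsimp only
  set n := PySem.Str.len s with hn
  by_cases h0 : index = n
  · rw [show (4:Nat) = 3 + 1 from rfl, loopA_stop s n 3 0 index h0,
        if_neg (by rintro ⟨hne, -⟩; exact hne h0)]
    omega
  · have hlt : index < n := lt_of_le_of_ne h2 h0
    obtain ⟨c0, hg0⟩ := kwas_get_ex s index h1 hlt
    by_cases hA : c0 = 'A'
    · subst hA
      rw [show (4:Nat) = 3 + 1 from rfl, loopA_stepA s n 3 index h0 hg0]
      by_cases h1n : index + 1 = n
      · rw [show (3:Nat) = 2 + 1 from rfl, loopA_stop s n 2 1 (index + 1) h1n,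
            if_pos ⟨h0, hg0⟩, if_neg (by rintro ⟨hne, -⟩; exact hne h1n)]
        omega
      · have hlt1 : index + 1 < n := lt_of_le_of_ne (by omega) h1n
        obtain ⟨c1, hg1⟩ := kwas_get_ex s (index + 1) (by omega) hlt1
        by_cases hS : c1 = 'S'
        · subst hS
          rw [show (3:Nat) = 2 + 1 from rfl, loopA_stepS s n 2 (index + 1) h1n hg1,
              if_pos ⟨h0, hg0⟩, if_pos ⟨h1n, hg1⟩]
          by_cases h2n : index + 1 + 1 = n
          · rw [show (2:Nat) = 1 + 1 from rfl, loopA_stop s n 1 2 (index + 1 + 1) h2n]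
            omega
          · have hlt2 : index + 1 + 1 < n := lt_of_le_of_ne (by omega) h2n
            obtain ⟨c2, hg2⟩ := kwas_get_ex s (index + 1 + 1) (by omega) hlt2
            rw [show (2:Nat) = 1 + 1 from rfl, loopA_step2 s n 1 (index + 1 + 1) c2 h2n hg2]
            omega
        · rw [show (3:Nat) = 2 + 1 from rfl, loopA_stepNotS s n 2 (index + 1) c1 h1n hg1 hS,
              if_pos ⟨h0, hg0⟩,
              if_neg (by rintro ⟨-, hv⟩; rw [hg1] at hv; exact hS (Option.some.inj hv))]
          omega
    · rw [show (4:Nat) = 3 + 1 from rfl, loopA_stepNotA s n 3 index c0 h0 hg0 hA,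
          if_neg (by rintro ⟨-, hv⟩; rw [hg0] at hv; exact hA (Option.some.inj hv))]
      omega
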